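-- pv_equiv track=rewrite | github.com/andrewchoi1735/test_rpg | game/player.py | get_required_exp
-- ===== SOURCE A (Python) =====
-- MAX_LEVEL = 150
--
-- def get_required_exp(level: int) -> int:
-- 	if level >= MAX_LEVEL:
-- 		return 0
-- 	if level <= 10:
-- 		return level * 1500
-- 	elif level <= 20:
-- 		return level * 6000
-- 	elif level <= 30:
-- 		return level * 16000
-- 	elif level <= 40:
-- 		return level * 30000
-- 	elif level <= 50:
-- 		return level * 50000
-- 	elif level <= 60:
-- 		return level * 70000
-- 	elif level <= 70:
-- 		return level * 100000
-- 	elif level <= 80: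
-- 		return level * 150000
-- 	elif level <= 90:
-- 		return level * 200000
-- 	elif level == 100:
-- 		return 1_000_000_000
-- 	else:
-- 		return int(get_required_exp(level - 1) * 1.15)
-- ===== SOURCE B (Python) =====
-- MAX_LEVEL = 150
--
-- _TIERS = [(10, 1500), (20, 6000), (30, 16000), (40, 30000), (50, 50000),
--           (60, 70000), (70, 100000), (80, 150000), (90, 200000)]
--
-- def get_required_exp(level: int) -> int:
--     if level >= MAX_LEVEL:
--         return 0
--     for bound, mult in _TIERS:
--         if level <= bound:
--             return level * mult
--     if level < 100:
--         x, start = 90 * 200000, 90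
--     else:
--         x, start = 1_000_000_000, 100
--     for _ in range(start, level):
--         x = int(x * 1.15)
--     return x
-- ===== Notes on version B (the rewrite author's own statement) =====
-- stated objective: alternative
-- what changed: The recursive chain int(get_required_exp(level-1)*1.15) is replaced by a forward loop from a fixed anchor (level 90 or 100), and the flat if-elif ladder by a scan over a tier table; the int(x*1.15) truncation is threaded forward step-for-step.
import Mathlib
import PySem

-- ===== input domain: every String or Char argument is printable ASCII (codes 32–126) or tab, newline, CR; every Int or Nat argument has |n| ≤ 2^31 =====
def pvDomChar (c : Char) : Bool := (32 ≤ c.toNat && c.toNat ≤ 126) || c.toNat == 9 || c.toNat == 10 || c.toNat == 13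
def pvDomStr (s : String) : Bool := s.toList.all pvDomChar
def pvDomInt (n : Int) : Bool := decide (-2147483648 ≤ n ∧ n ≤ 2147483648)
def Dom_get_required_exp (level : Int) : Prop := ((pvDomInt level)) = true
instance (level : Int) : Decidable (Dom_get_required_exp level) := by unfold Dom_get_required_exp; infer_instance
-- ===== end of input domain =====

-- B replaces A's recursive chain `int(get_required_exp(level-1)*1.15)` by a forward loop from a
-- fixed anchor, and the flat if-chain by a tier-table scan (objective: alternative decomposition).

-- Shared numeric primitive: exact model of Python's `int(x * 1.15)` for 0 < x < 2^53
-- (all values reached here are in that range): x converts to double exactly, the product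
-- x * fl(1.15) is rounded to nearest-even double, then truncated toward zero.
-- fl(1.15) = 5179139571476070 / 2^52 (the IEEE-754 double nearest to 1.15).

-- round p (a positive integer) to the nearest multiple of 2^k, ties to even multiple
def pvRNE (p : Int) (k : Nat) : Int :=
  if k = 0 then p
  else
    let d : Int := 2 ^ k
    let r := p % d
    let q := p - r
    if r < d / 2 then q
    else if r > d / 2 then q + d
    else if (q / d) % 2 = 0 then q else q + d

-- int(x * 1.15) for 0 < x < 2^53 (exact IEEE-754 double semantics on that range)
def pyMul115 (x : Int) : Int :=
  let p := x * 5179139571476070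
  let k := p.toNat.log2 + 1 - 53    -- bits of p beyond a 53-bit significand
  (pvRNE p k) / 2 ^ 52

-- ===== PORT A =====
def get_required_exp (level : Int) : Int :=
  if level ≥ 150 then 0
  else if level ≤ 10 then level * 1500
  else if level ≤ 20 then level * 6000
  else if level ≤ 30 then level * 16000
  else if level ≤ 40 then level * 30000
  else if level ≤ 50 then level * 50000
  else if level ≤ 60 then level * 70000
  else if level ≤ 70 then level * 100000
  else if level ≤ 80 then level * 150000
  else if level ≤ 90 then level * 200000
  else if level = 100 then 1000000000
  else pyMul115 (get_required_exp (level - 1))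
termination_by (level - 90).toNat
decreasing_by omega

-- ===== PORT B =====
-- B-side helper: the `for bound, mult in _TIERS: if level <= bound: return level*mult` loop
def pvFindTier (tiers : List (Int × Int)) (level : Int) : Option Int :=
  match tiers with
  | [] => none
  | (bound, mult) :: rest =>
      if level ≤ bound then some (level * mult) else pvFindTier rest level

def pvTiers : List (Int × Int) :=
  [(10, 1500), (20, 6000), (30, 16000), (40, 30000), (50, 50000),
   (60, 70000), (70, 100000), (80, 150000), (90, 200000)]

def get_required_exp_alt (level : Int) : Int :=
  if level ≥ 150 then 0
  else
    match pvFindTier pvTiers level with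
    | some v => v
    | none =>
        let (x, start) : Int × Int := if level < 100 then (90 * 200000, 90) else (1000000000, 100)
        (PySem.List.pyRange start level 1).foldl (fun x _ => pyMul115 x) x

-- ===== PRECONDITION & SPEC =====
def Spec_get_required_exp (level : Int) (out : Int) : Prop := out = get_required_exp_alt level
instance (level : Int) (out : Int) : Decidable (Spec_get_required_exp level out) := by unfold Spec_get_required_exp; infer_instance

-- ===== CLAIM (what is proved, stated in full; the proofs are below) =====
def Claim_equal_get_required_exp : Prop := ∀ (level : Int), Dom_get_required_exp level → Spec_get_required_exp level (get_required_exp level)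

-- ===== LEMMAS AND PROOFS =====

-- unroll A one step when level is in the recursive region
theorem A_step (level : Int) (h1 : 91 ≤ level) (h2 : level < 150) (h3 : level ≠ 100) :
    get_required_exp level = pyMul115 (get_required_exp (level - 1)) := by
  rw [get_required_exp.eq_def]
  rw [if_neg (by omega), if_neg (by omega), if_neg (by omega), if_neg (by omega),
      if_neg (by omega), if_neg (by omega), if_neg (by omega), if_neg (by omega),
      if_neg (by omega), if_neg (by omega), if_neg (by omega)]

theorem A_90 : get_required_exp 90 = 18000000 := by
  rw [get_required_exp.eq_def]; norm_num

theorem A_100 : get_required_exp 100 = 1000000000 := by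
  rw [get_required_exp.eq_def]; norm_num

-- A on 90..99 equals B's forward loop from the 90-anchor
theorem A_lo (n : Nat) (hn : n ≤ 9) :
    get_required_exp (90 + n) =
      (PySem.List.pyRange 90 (90 + (n : Int)) 1).foldl (fun x _ => pyMul115 x) 18000000 := by
  induction n with
  | zero => simpa [PySem.List.pyRange_one_eq_nil] using A_90
  | succ m ih =>
      have hm : (m : Int) ≤ 8 := by exact_mod_cast Nat.le_of_succ_le_succ hn
      have h1 : (90 : Int) + (m + 1 : Nat) = (90 + m) + 1 := by push_cast; ring
      rw [h1, A_step _ (by omega) (by omega) (by omega),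
          PySem.List.pyRange_one_succ_right (by omega), List.foldl_append]
      simp only [List.foldl_cons, List.foldl_nil]
      rw [show (90 : Int) + (m : Nat) + 1 - 1 = 90 + (m : Nat) by ring,
          ih (by omega)]

-- A on 100..149 equals B's forward loop from the 100-anchor
theorem A_hi (n : Nat) (hn : n ≤ 49) :
    get_required_exp (100 + n) =
      (PySem.List.pyRange 100 (100 + (n : Int)) 1).foldl (fun x _ => pyMul115 x) 1000000000 := by
  induction n with
  | zero => simpa [PySem.List.pyRange_one_eq_nil] using A_100
  | succ m ih =>
      have hm : (m : Int) ≤ 48 := by exact_mod_cast Nat.le_of_succ_le_succ hn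
      have h1 : (100 : Int) + (m + 1 : Nat) = (100 + m) + 1 := by push_cast; ring
      rw [h1, A_step _ (by omega) (by omega) (by omega),
          PySem.List.pyRange_one_succ_right (by omega), List.foldl_append]
      simp only [List.foldl_cons, List.foldl_nil]
      rw [show (100 : Int) + (m : Nat) + 1 - 1 = 100 + (m : Nat) by ring,
          ih (by omega)]

theorem findTier_none (level : Int) (h : 91 ≤ level) : pvFindTier pvTiers level = none := by
  simp only [pvTiers, pvFindTier]
  rw [if_neg (by omega), if_neg (by omega), if_neg (by omega), if_neg (by omega),
      if_neg (by omega), if_neg (by omega), if_neg (by omega), if_neg (by omega),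
      if_neg (by omega)]

-- ===== VERDICT (by name: the statement is the Claim_ definition above) =====
theorem get_required_exp_spec : Claim_equal_get_required_exp := by
  intro level _
  unfold Spec_get_required_exp get_required_exp_alt
  by_cases h150 : level ≥ 150
  · rw [if_pos h150, get_required_exp.eq_def, if_pos h150]
  · rw [if_neg h150]
    by_cases h90 : level ≤ 90
    · -- flat tier region: both sides are the same guarded products
      rw [get_required_exp.eq_def, if_neg h150]
      simp only [pvTiers, pvFindTier]
      split_ifs <;> rfl
    · -- recursive region 91..149
      rw [findTier_none level (by omega)]
      by_cases h100 : level < 100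
      · rw [if_pos h100]
        have hn : level = 90 + ((level - 90).toNat : Int) := by omega
        have := A_lo (level - 90).toNat (by omega)
        rw [hn]
        simpa using this
      · rw [if_neg h100]
        have hn : level = 100 + ((level - 100).toNat : Int) := by omega
        have := A_hi (level - 100).toNat (by omega)
        rw [hn]
        simpa using this
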